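-- pv_equiv track=rewrite | github.com/fzingithub/SwordRefers2Offer | 4_LEETCODE/9_Interview/字节跳动/Dec2Hex.py | D2H
-- ===== SOURCE A (Python) =====
-- def D2H(num):
--     '''
--     十进制转十六进制
--     负数 32bit 补 正
--     '''
--
--     num = num + 2**32 if num < 0 else num
--
--     res = []
--     while num:
--         low = num % 16
--         num = num // 16
--         res.append(low)
--
--     res = res[::-1]
--
--     mapList = ['a', 'b', 'c', 'd', 'e', 'f']
--
--     for i in range(len(res)):
--         if res[i] > 9:
--             res[i] = mapList[res[i]-10]
--     return ''.join(map(str, res))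
-- ===== SOURCE B (Python) =====
-- def D2H(num):
--     if num < 0:
--         num += 2 ** 32
--     if num == 0:
--         return ''
--     return D2H(num // 16) + '0123456789abcdef'[num % 16]
-- ===== Notes on version B (the rewrite author's own statement) =====
-- stated objective: simpler
-- what changed: Replaces the LSB-first digit loop + list reversal + separate letter-mapping pass + join with a single recursion that emits digits most-significant-first via an indexed hex alphabet.
import Mathlib
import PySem

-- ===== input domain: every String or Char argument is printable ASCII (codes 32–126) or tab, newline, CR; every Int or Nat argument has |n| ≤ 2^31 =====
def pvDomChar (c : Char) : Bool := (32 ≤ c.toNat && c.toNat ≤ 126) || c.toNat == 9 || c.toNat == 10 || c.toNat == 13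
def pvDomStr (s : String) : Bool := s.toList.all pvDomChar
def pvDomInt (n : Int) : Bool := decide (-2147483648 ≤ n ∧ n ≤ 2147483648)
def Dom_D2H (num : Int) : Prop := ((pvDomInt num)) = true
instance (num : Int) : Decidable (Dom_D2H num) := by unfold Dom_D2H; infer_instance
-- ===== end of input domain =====

-- B rewrites A's LSB-first digit loop + reversal + letter-mapping pass + join as one
-- recursion emitting digits most-significant-first from an indexed hex alphabet (simpler).

-- ===== PORT A =====
-- A's 'while num:' loop. After the sign adjustment the value is nonnegative on Dom_D2H,
-- so the loop is ported over Nat, where '%' and '/' coincide with Python's '%' and '//'.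
def aDigits (n : Nat) (res : List Nat) : List Nat :=
  if h : n = 0 then res
  else aDigits (n / 16) (res ++ [n % 16])
decreasing_by exact Nat.div_lt_self (Nat.pos_of_ne_zero h) (by norm_num)

-- A's per-element transformation fused with the final map(str, ·): the in-place
-- 'res[i] = mapList[res[i]-10]' for digits > 9, then str(·) on each element (exact:
-- str of a replaced one-char string is itself, str of a digit ≤ 9 is its decimal form).
def aStrOf (d : Nat) : String :=
  if d > 9 then (["a", "b", "c", "d", "e", "f"]).getD (d - 10) "" else PySem.Int.toStr (d : Int)

def D2H (num : Int) : String :=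
  let num2 := if num < 0 then num + 2 ^ 32 else num
  let res := aDigits num2.toNat []
  let res2 := res.reverse          -- res[::-1]
  PySem.Str.join "" (res2.map aStrOf)   -- ''.join(map(str, res))

-- ===== PORT B =====
-- B's recursion, over List Char (String.mk at the top level); num // 16 and num % 16 on the
-- nonnegative adjusted value are Nat / and %. The index n % 16 is always < 16, so getD is exact.
def bChars (n : Nat) : List Char :=
  if h : n = 0 then []
  else bChars (n / 16) ++ [("0123456789abcdef".toList).getD (n % 16) ' ']
decreasing_by exact Nat.div_lt_self (Nat.pos_of_ne_zero h) (by norm_num)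

def D2H_alt (num : Int) : String :=
  let num2 := if num < 0 then num + 2 ^ 32 else num
  String.ofList (bChars num2.toNat)

-- ===== PRECONDITION & SPEC =====
def Spec_D2H (num : Int) (out : String) : Prop := out = D2H_alt num
instance (num : Int) (out : String) : Decidable (Spec_D2H num out) := by unfold Spec_D2H; infer_instance

-- ===== CLAIM (what is proved, stated in full; the proofs are below) =====
def Claim_equal_D2H : Prop := ∀ (num : Int), Dom_D2H num → Spec_D2H num (D2H num)

-- ===== LEMMAS AND PROOFS =====

def hexChar (d : Nat) : Char := ("0123456789abcdef".toList).getD d ' '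

theorem aDigits_step (n : Nat) (h : n ≠ 0) :
    aDigits n [] = aDigits (n / 16) [n % 16] := by
  rw [aDigits, dif_neg h]; simp

theorem aDigits_acc (n : Nat) : ∀ acc : List Nat, aDigits n acc = acc ++ aDigits n [] := by
  induction n using Nat.strong_induction_on with
  | _ n ih =>
    intro acc
    by_cases h : n = 0
    · simp [aDigits, h]
    · rw [aDigits, dif_neg h, aDigits_step n h,
        ih (n / 16) (Nat.div_lt_self (Nat.pos_of_ne_zero h) (by norm_num)) (acc ++ [n % 16]),
        ih (n / 16) (Nat.div_lt_self (Nat.pos_of_ne_zero h) (by norm_num)) [n % 16]]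
      simp

theorem aDigits_lt (n : Nat) : ∀ d ∈ aDigits n [], d < 16 := by
  induction n using Nat.strong_induction_on with
  | _ n ih =>
    intro d hd
    by_cases h : n = 0
    · rw [aDigits, dif_pos h] at hd; simp at hd
    · rw [aDigits_step n h, aDigits_acc (n / 16) [n % 16]] at hd
      rcases List.mem_append.mp hd with h1 | h2
      · simp at h1; omega
      · exact ih (n / 16) (Nat.div_lt_self (Nat.pos_of_ne_zero h) (by norm_num)) d h2

theorem aStrOf_toList (d : Nat) (hd : d < 16) : (aStrOf d).toList = [hexChar d] := by
  interval_cases d <;> rfl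

theorem digits_eq (n : Nat) : (aDigits n []).reverse.map hexChar = bChars n := by
  induction n using Nat.strong_induction_on with
  | _ n ih =>
    by_cases h : n = 0
    · subst h; simp [aDigits, bChars]
    · rw [aDigits_step n h, aDigits_acc (n / 16) [n % 16], bChars, dif_neg h]
      simp only [List.reverse_append, List.reverse_singleton, List.map_append]
      rw [ih (n / 16) (Nat.div_lt_self (Nat.pos_of_ne_zero h) (by norm_num))]
      rfl

theorem key (n : Nat) :
    (PySem.Str.join "" ((aDigits n []).reverse.map aStrOf)).toList = bChars n := by
  rw [PySem.Str.toList_join]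
  have hmap : List.map String.toList ((aDigits n []).reverse.map aStrOf)
      = List.map (fun c => [c]) ((aDigits n []).reverse.map hexChar) := by
    simp only [List.map_map, List.map_reverse]
    congr 1
    apply List.map_congr_left
    intro d hd
    exact aStrOf_toList d (aDigits_lt n d hd)
  rw [hmap]
  have he : ("" : String).toList = [] := rfl
  rw [he, PySem.Chars.join_nil_singletons, digits_eq]

-- ===== VERDICT (by name: the statement is the Claim_ definition above) =====
theorem D2H_spec : Claim_equal_D2H := by
  intro num _
  unfold Spec_D2H
  simp only [D2H, D2H_alt]
  apply String.toList_injective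
  rw [key, String.toList_ofList]
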